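-- pv_equiv track=rewrite | github.com/minimario47/Sparplanen | TrainData/legacy/make_track_arrival_departure_csv_v4.py | canonical_pattern
-- ===== SOURCE A (Python) =====
-- from typing import Dict, Iterable, List, Tuple
--
-- def canonical_pattern(tokens: List[str]) -> str:
--     mapping: Dict[str, str] = {}
--     out = []
--     next_idx = 0
--     for token in tokens:
--         if token not in mapping:
--             mapping[token] = chr(ord("A") + next_idx)
--             next_idx += 1
--         out.append(mapping[token])
--     return "".join(out)
-- ===== SOURCE B (Python) =====
-- def canonical_pattern(tokens):
--     # A token's letter index = number of distinct tokens strictly before its first occurrence.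
--     return "".join(chr(ord("A") + len(set(tokens[:tokens.index(t)]))) for t in tokens)
-- ===== Notes on version B (the rewrite author's own statement) =====
-- stated objective: alternative
-- what changed: B drops the mapping dict entirely: for each token it recomputes the letter index as the number of distinct tokens in the prefix before that token's first occurrence (tokens.index + set of a slice), a quadratic dict-free algorithm vs A's single stateful pass.
import Mathlib
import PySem

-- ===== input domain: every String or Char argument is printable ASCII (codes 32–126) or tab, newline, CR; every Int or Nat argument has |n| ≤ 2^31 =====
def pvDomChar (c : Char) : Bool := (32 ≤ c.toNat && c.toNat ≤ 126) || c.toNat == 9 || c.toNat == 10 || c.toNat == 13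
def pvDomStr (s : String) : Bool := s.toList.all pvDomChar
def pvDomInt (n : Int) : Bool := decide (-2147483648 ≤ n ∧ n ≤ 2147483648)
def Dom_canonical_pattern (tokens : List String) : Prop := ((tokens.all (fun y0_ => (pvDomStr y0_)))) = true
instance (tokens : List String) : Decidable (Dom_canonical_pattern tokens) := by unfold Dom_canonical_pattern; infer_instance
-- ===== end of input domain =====

-- B drops the mapping dict: each token's letter index is recomputed as the number of distinct
-- tokens before its first occurrence (index + set of a prefix slice) — a dict-free quadratic
-- alternative to A's single stateful pass; same return value.

-- chr(ord("A") + i) as a one-character string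
def pvLetter (i : Int) : String := String.ofList [Char.ofNat (65 + i).toNat]

-- ===== PORT A =====
def canonical_pattern (tokens : List String) : String :=
  let st := tokens.foldl
    (fun (st : PySem.Dict String String × List String × Int) token =>
      let m := st.1
      let out := st.2.1
      let n := st.2.2
      let mn := if m.contains token then (m, n) else (m.insert token (pvLetter n), n + 1)
      (mn.1, out ++ [mn.1.getD token ""], mn.2))
    (PySem.Dict.empty, [], 0)
  PySem.Str.join "" st.2.1

-- ===== PORT B =====
-- tokens.index(t): index? is always `some` here since t is drawn from tokens; getD 0 never fires.
def canonical_pattern_alt (tokens : List String) : String :=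
  PySem.Str.join "" (tokens.map (fun t =>
    pvLetter (PySem.List.len (PySem.Set.ofList
      (PySem.List.slice tokens none
        (some (((PySem.List.index? tokens t).getD 0 : Nat) : Int)))))))

-- ===== PRECONDITION & SPEC =====
def Spec_canonical_pattern (tokens : List String) (out : String) : Prop := out = canonical_pattern_alt tokens
instance (tokens : List String) (out : String) : Decidable (Spec_canonical_pattern tokens out) := by unfold Spec_canonical_pattern; infer_instance

-- ===== CLAIM (what is proved, stated in full; the proofs are below) =====
def Claim_equal_canonical_pattern : Prop := ∀ (tokens : List String), Dom_canonical_pattern tokens → Spec_canonical_pattern tokens (canonical_pattern tokens)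

-- ===== LEMMAS AND PROOFS =====

-- A's table, as a function of the key order
def pvDictOf (S : List String) : PySem.Dict String String :=
  (PySem.List.enumerate S).foldl
    (fun (d : PySem.Dict String String) p => d.insert p.2 (pvLetter p.1)) PySem.Dict.empty

lemma pvDictOf_append_singleton (S : List String) (x : String) :
    pvDictOf (S ++ [x]) = (pvDictOf S).insert x (pvLetter S.length) := by
  simp [pvDictOf, PySem.List.enumerate_append, List.foldl_append]

lemma get?_pvDictOf (S : List String) (hS : S.Nodup) (t : String) :
    (pvDictOf S).get? t = if t ∈ S then some (pvLetter (S.idxOf t)) else none := by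
  induction S using List.reverseRecOn with
  | nil => simp [pvDictOf, PySem.List.enumerate_nil, PySem.Dict.get?_empty]
  | append_singleton S x ih =>
    have hx : x ∉ S := by
      simp [List.nodup_append] at hS
      exact fun h => hS.2 x h rfl
    have hS' : S.Nodup := by simp [List.nodup_append] at hS; exact hS.1
    rw [pvDictOf_append_singleton, PySem.Dict.get?_insert, ih hS']
    by_cases htx : t = x
    · subst htx
      simp [List.idxOf_append, hx]
    · by_cases htS : t ∈ S
      · simp [htx, htS, List.idxOf_append]
      · simp [htx, htS]

-- A's step function
def pvStepA (st : PySem.Dict String String × List String × Int) (token : String) :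
    PySem.Dict String String × List String × Int :=
  let m := st.1
  let out := st.2.1
  let n := st.2.2
  let mn := if m.contains token then (m, n) else (m.insert token (pvLetter n), n + 1)
  (mn.1, out ++ [mn.1.getD token ""], mn.2)

lemma pvRunA (rest : List String) : ∀ (S : List String) (out : List String), S.Nodup →
    rest.foldl pvStepA (pvDictOf S, out, (S.length : Int)) =
      (pvDictOf (PySem.Set.update S rest),
       out ++ rest.map (fun t => pvLetter ((PySem.Set.update S rest).idxOf t)),
       ((PySem.Set.update S rest).length : Int)) := by
  induction rest with
  | nil => simp [PySem.Set.update_nil]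
  | cons t r ih =>
    intro S out hS
    by_cases ht : t ∈ S
    · have hc : (pvDictOf S).contains t = true := by
        rw [PySem.Dict.contains_eq_isSome_get?, get?_pvDictOf S hS]
        simp [ht]
      have hgd : (pvDictOf S).getD t "" = pvLetter (S.idxOf t) := by
        rw [PySem.Dict.getD_eq_get?_getD, get?_pvDictOf S hS]
        simp [ht]
      have hupd : PySem.Set.update S (t :: r) = PySem.Set.update S r := by
        rw [PySem.Set.update_cons, PySem.Set.add_of_mem ht]
      have hidx : (PySem.Set.update S r).idxOf t = S.idxOf t := by
        rw [PySem.Set.update_eq_append_filter, List.idxOf_append]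
        simp [ht]
      simp only [List.foldl_cons, pvStepA, hc, if_true, hgd]
      rw [ih S (out ++ [pvLetter (S.idxOf t)]) hS, hupd]
      simp [hidx]
    · have hc : (pvDictOf S).contains t = false := by
        rw [PySem.Dict.contains_eq_isSome_get?, get?_pvDictOf S hS]
        simp [ht]
      have hS' : (S ++ [t]).Nodup := by
        simp [List.nodup_append, hS]
        exact fun a ha h => ht (h ▸ ha)
      have hins : (pvDictOf S).insert t (pvLetter (S.length : Int)) = pvDictOf (S ++ [t]) :=
        (pvDictOf_append_singleton S t).symm
      have hgd : (pvDictOf (S ++ [t])).getD t "" = pvLetter (S.length : Int) := by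
        rw [← hins]
        exact PySem.Dict.getD_insert_self _ _ _ _
      have hupd : PySem.Set.update S (t :: r) = PySem.Set.update (S ++ [t]) r := by
        rw [PySem.Set.update_cons, PySem.Set.add_of_not_mem ht]
      have hidxt : t ∈ S ++ [t] := by simp
      have hidx : (PySem.Set.update (S ++ [t]) r).idxOf t = S.length := by
        rw [PySem.Set.update_eq_append_filter, List.idxOf_append]
        simp [hidxt, List.idxOf_append, ht]
      have hlen : ((S.length : Int) + 1) = (((S ++ [t]).length : Nat) : Int) := by
        simp
      simp only [List.foldl_cons, pvStepA, hc, if_false, Bool.false_eq_true, hins, hgd, hlen]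
      rw [ih (S ++ [t]) (out ++ [pvLetter (S.length : Int)]) hS', hupd]
      simp [hidx]

-- B-side key fact: the number of distinct tokens strictly before t's first occurrence equals
-- t's index in the first-appearance order, generalized over an already-seen set S.
lemma pvPrefixDistinct (rest : List String) : ∀ (S : List String) (t : String),
    t ∈ rest → t ∉ S → S.Nodup →
    (PySem.Set.update S (rest.take (rest.idxOf t))).length = (PySem.Set.update S rest).idxOf t := by
  induction rest with
  | nil => intro S t h; simp at h
  | cons x r ih =>
    intro S t ht htS hS
    by_cases hx : x = t
    · subst hx
      have h0 : (x :: r).idxOf x = 0 := by simp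
      rw [h0]
      simp only [List.take_zero, PySem.Set.update_nil]
      have hupd : PySem.Set.update S (x :: r) = PySem.Set.update (S ++ [x]) r := by
        rw [PySem.Set.update_cons, PySem.Set.add_of_not_mem htS]
      rw [hupd, PySem.Set.update_eq_append_filter, List.idxOf_append]
      have hxm : x ∈ S ++ [x] := by simp
      simp [hxm, List.idxOf_append, htS]
    · have hxt : x ≠ t := hx
      have hidx : (x :: r).idxOf t = r.idxOf t + 1 := by
        simp [hxt]
      rw [hidx]
      simp only [List.take_succ_cons]
      have hcons : ∀ (l : List String), PySem.Set.update S (x :: l) = PySem.Set.update (PySem.Set.add S x) l := by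
        intro l; rw [PySem.Set.update_cons]
      rw [hcons, hcons]
      have htr : t ∈ r := by
        rcases List.mem_cons.mp ht with h | h
        · exact absurd h.symm hxt
        · exact h
      have htS' : t ∉ PySem.Set.add S x := by
        rw [PySem.Set.mem_add]
        rintro (h | h)
        · exact htS h
        · exact hxt h.symm
      exact ih (PySem.Set.add S x) t htr htS' (PySem.Set.nodup_add S x hS)

-- ===== VERDICT (by name: the statement is the Claim_ definition above) =====
theorem canonical_pattern_spec : Claim_equal_canonical_pattern := by
  intro tokens _
  unfold Spec_canonical_pattern
  have hA : canonical_pattern tokens =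
      PySem.Str.join "" (tokens.foldl pvStepA (pvDictOf [], [], ((([] : List String)).length : Int))).2.1 := rfl
  rw [hA, pvRunA tokens [] [] List.nodup_nil]
  simp only [PySem.Set.update_nil_left]
  unfold canonical_pattern_alt
  simp only [List.nil_append]
  congr 1
  apply List.map_congr_left
  intro t htm
  have hidx? : PySem.List.index? tokens t = some (tokens.idxOf t) := by
    rw [PySem.List.index?_eq_idxOf?, List.idxOf?_eq_some_iff]
    refine ⟨List.idxOf_lt_length_of_mem htm, List.getElem_idxOf _, fun j hj he => ?_⟩
    exact absurd he (by
      simpa using List.not_of_lt_findIdx (p := (· == t)) (xs := tokens) (by simpa [List.idxOf] using hj))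
  rw [hidx?]
  simp only [Option.getD_some, PySem.List.slice_to_natCast, PySem.List.len_eq]
  have hkey := pvPrefixDistinct tokens [] t htm (by simp) List.nodup_nil
  rw [PySem.Set.update_nil_left] at hkey
  rw [hkey, PySem.Set.update_nil_left]
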